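-- pv_equiv track=rewrite | github.com/kemingy/daily-coding-problem | src/utf8_check.py | utf8_check
-- ===== SOURCE A (Python) =====
-- def utf8_check(nums):
--     i, n = 0, len(nums)
--     while i < n:
--         if nums[i] < 128:
--             i += 1
--             continue
--         elif nums[i] < 192:
--             if not (i + 1 < n and nums[i+1] < 192):
--                 return False
--             i += 2
--             continue
--         elif nums[i] < 224:
--             if not (i + 2 < n and all([nums[j] < 192 for j in range(i+1, i+3)])):
--                 return False
--             i += 3
--             continue
--         elif nums[i] < 240:
--             if not (i + 3 < n and all([nums[j] < 192 for j in range(i+1, i+4)])):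
--                 return False
--             i += 4
--             continue
--         else:
--             return False
--     return True
-- ===== SOURCE B (Python) =====
-- def utf8_check(nums):
--     n = len(nums)
--     dp = [False] * (n + 1)
--     dp[n] = True
--     for i in range(n - 1, -1, -1):
--         b = nums[i]
--         if b >= 240:
--             continue
--         cont = 0 if b < 128 else 1 if b < 192 else 2 if b < 224 else 3
--         if i + cont < n and all(nums[j] < 192 for j in range(i + 1, i + cont + 1)):
--             dp[i] = dp[i + cont + 1]
--     return dp[0]
-- ===== Notes on version B (the rewrite author's own statement) =====
-- stated objective: alternative
-- what changed: Replaces A's greedy left-to-right pointer walk with four unrolled branches by a right-to-left dynamic programming pass that fills a table dp[i] = 'suffix starting at i is valid' for every position and returns the table entry for the start of the list.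
import Mathlib
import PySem

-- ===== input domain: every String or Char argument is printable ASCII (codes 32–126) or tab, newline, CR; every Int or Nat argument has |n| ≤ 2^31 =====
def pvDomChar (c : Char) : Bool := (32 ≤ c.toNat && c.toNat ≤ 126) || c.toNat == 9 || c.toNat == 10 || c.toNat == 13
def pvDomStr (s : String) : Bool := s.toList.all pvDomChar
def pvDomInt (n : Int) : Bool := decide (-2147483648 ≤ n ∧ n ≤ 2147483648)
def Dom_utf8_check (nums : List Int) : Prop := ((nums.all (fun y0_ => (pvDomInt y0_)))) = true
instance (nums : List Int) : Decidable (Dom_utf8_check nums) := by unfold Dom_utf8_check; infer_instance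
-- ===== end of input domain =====

-- B replaces A's greedy left-to-right pointer walk by a right-to-left dynamic-programming
-- pass filling dp[i] = "suffix starting at i is valid" and reading off the entry for the start of the list (objective: alternative).

-- ===== PORT A =====
-- A's while loop over index i; each branch tests its own bound and checks its continuation bytes.
def utf8_check_go (nums : List Int) (n i : Nat) : Bool :=
  if i < n then
    if nums.getD i 0 < 128 then
      utf8_check_go nums n (i + 1)
    else if nums.getD i 0 < 192 then
      if decide (i + 1 < n) && decide (nums.getD (i+1) 0 < 192) then
        utf8_check_go nums n (i + 2)
      else false
    else if nums.getD i 0 < 224 then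
      if decide (i + 2 < n) && (List.range' (i+1) 2).all (fun j => decide (nums.getD j 0 < 192)) then
        utf8_check_go nums n (i + 3)
      else false
    else if nums.getD i 0 < 240 then
      if decide (i + 3 < n) && (List.range' (i+1) 3).all (fun j => decide (nums.getD j 0 < 192)) then
        utf8_check_go nums n (i + 4)
      else false
    else false
  else true
termination_by n - i
decreasing_by all_goals omega

def utf8_check (nums : List Int) : Bool := utf8_check_go nums nums.length 0

-- ===== PORT B =====
-- B's for-loop over i = n-1, …, 0 filling the dp table (dp is the Python list of n+1 booleans).
def utf8_check_alt_loop (nums : List Int) (n : Nat) (dp : List Bool) : List Nat → List Bool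
  | [] => dp
  | i :: rest =>
    let b := nums.getD i 0
    let dp' :=
      if b ≥ 240 then dp
      else
        let cont : Nat := if b < 128 then 0 else if b < 192 then 1 else if b < 224 then 2 else 3
        if decide (i + cont < n) && (List.range' (i+1) cont).all (fun j => decide (nums.getD j 0 < 192)) then
          dp.set i (dp.getD (i + cont + 1) false)
        else dp
    utf8_check_alt_loop nums n dp' rest

def utf8_check_alt (nums : List Int) : Bool :=
  let n := nums.length
  let dp := (List.replicate (n + 1) false).set n true
  (utf8_check_alt_loop nums n dp (List.range n).reverse).getD 0 false

-- ===== PRECONDITION & SPEC =====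
def Spec_utf8_check (nums : List Int) (out : Bool) : Prop := out = utf8_check_alt nums
instance (nums : List Int) (out : Bool) : Decidable (Spec_utf8_check nums out) := by unfold Spec_utf8_check; infer_instance

-- ===== CLAIM (what is proved, stated in full; the proofs are below) =====
def Claim_equal_utf8_check : Prop := ∀ (nums : List Int), Dom_utf8_check nums → Spec_utf8_check nums (utf8_check nums)

-- ===== LEMMAS AND PROOFS =====

-- Continuation-byte count of a leader byte (proof-side helper; ∞ encoded by the caller's ≥240 test).
def contOf (b : Int) : Nat := if b < 128 then 0 else if b < 192 then 1 else if b < 224 then 2 else 3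

-- One iteration of B's dp-filling loop, written with contOf (definitionally the loop body).
def altStep (nums : List Int) (n : Nat) (dp : List Bool) (i : Nat) : List Bool :=
  if 240 ≤ nums.getD i 0 then dp
  else if decide (i + contOf (nums.getD i 0) < n) &&
      (List.range' (i+1) (contOf (nums.getD i 0))).all (fun j => decide (nums.getD j 0 < 192)) then
    dp.set i (dp.getD (i + contOf (nums.getD i 0) + 1) false)
  else dp

theorem alt_loop_cons (nums : List Int) (n : Nat) (dp : List Bool) (i : Nat) (rest : List Nat) :
    utf8_check_alt_loop nums n dp (i :: rest) = utf8_check_alt_loop nums n (altStep nums n dp i) rest := rfl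

-- A's greedy step, rewritten in the contOf shape shared with B's loop body.
theorem go_step (nums : List Int) (n i : Nat) (hi : i < n) :
    utf8_check_go nums n i =
      (if 240 ≤ nums.getD i 0 then false
       else if decide (i + contOf (nums.getD i 0) < n) &&
          (List.range' (i+1) (contOf (nums.getD i 0))).all (fun j => decide (nums.getD j 0 < 192)) then
         utf8_check_go nums n (i + contOf (nums.getD i 0) + 1)
       else false) := by
  rw [utf8_check_go]
  simp only [List.getD] at *
  by_cases h0 : nums[i]?.getD 0 < (128 : Int)
  · have h240 : ¬ (240 : Int) ≤ nums[i]?.getD 0 := by omega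
    simp [hi, h0, h240, contOf]
  · by_cases h1 : nums[i]?.getD 0 < (192 : Int)
    · have h240 : ¬ (240 : Int) ≤ nums[i]?.getD 0 := by omega
      rcases Nat.lt_or_ge (i+1) n with hb | hb
      · simp [hi, h0, h1, h240, hb, contOf, show i+1+1 = i+2 from rfl]
      · have hb' : ¬ i + 1 < n := by omega
        simp [hi, h0, h1, h240, hb', contOf]
    · by_cases h2 : nums[i]?.getD 0 < (224 : Int)
      · have h240 : ¬ (240 : Int) ≤ nums[i]?.getD 0 := by omega
        simp [hi, h0, h1, h2, h240, contOf, show i+2+1 = i+3 from rfl, Bool.and_assoc]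
      · by_cases h3 : nums[i]?.getD 0 < (240 : Int)
        · have h240 : ¬ (240 : Int) ≤ nums[i]?.getD 0 := by omega
          simp [hi, h0, h1, h2, h3, h240, contOf, show i+3+1 = i+4 from rfl, Bool.and_assoc]
        · have h240 : (240 : Int) ≤ nums[i]?.getD 0 := by omega
          simp [hi, h0, h1, h2, h3, h240]

-- Loop invariant: if dp agrees with the greedy answers on indices ≥ i (and is false below i),
-- then running B's loop on [i-1, …, 0] makes it agree everywhere up to n.
theorem loop_invariant (nums : List Int) (n : Nat) :
    ∀ (i : Nat) (dp : List Bool), i ≤ n → dp.length = n + 1 →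
      (∀ j, j < i → dp.getD j false = false) →
      (∀ j, i ≤ j → j ≤ n → dp.getD j false = utf8_check_go nums n j) →
      ∀ j, j ≤ n →
        (utf8_check_alt_loop nums n dp (List.range i).reverse).getD j false = utf8_check_go nums n j := by
  intro i
  induction i with
  | zero =>
    intro dp _ _ _ hhi j hj
    simpa [utf8_check_alt_loop] using hhi j (Nat.zero_le _) hj
  | succ i ih =>
    intro dp hin hlen hlo hhi j hj
    have hrange : (List.range (i+1)).reverse = i :: (List.range i).reverse := by
      simp [List.range_succ]
    rw [hrange, alt_loop_cons]
    have hiv : i < n := by omega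
    have hstep := go_step nums n i hiv
    by_cases h240 : (240 : Int) ≤ nums.getD i 0
    · have hgo : utf8_check_go nums n i = false := by rw [hstep, if_pos h240]
      rw [altStep, if_pos h240]
      refine ih dp (by omega) hlen (fun k hk => hlo k (by omega)) ?_ j hj
      intro k hk hkn
      by_cases hki : k = i
      · subst hki
        rw [hlo _ (by omega), hgo]
      · exact hhi k (by omega) hkn
    · by_cases hc : (decide (i + contOf (nums.getD i 0) < n) &&
          (List.range' (i+1) (contOf (nums.getD i 0))).all (fun j => decide (nums.getD j 0 < 192))) = true
      · have hcn : i + contOf (nums.getD i 0) < n :=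
          of_decide_eq_true ((Bool.and_eq_true _ _).mp hc).1
        have hgo : utf8_check_go nums n i = utf8_check_go nums n (i + contOf (nums.getD i 0) + 1) := by
          rw [hstep, if_neg h240, if_pos hc]
        have hset : altStep nums n dp i = dp.set i (dp.getD (i + contOf (nums.getD i 0) + 1) false) := by
          rw [altStep, if_neg h240, if_pos hc]
        rw [hset]
        have hlen' : (dp.set i (dp.getD (i + contOf (nums.getD i 0) + 1) false)).length = n + 1 := by
          simp [hlen]
        have hval : dp.getD (i + contOf (nums.getD i 0) + 1) false
            = utf8_check_go nums n (i + contOf (nums.getD i 0) + 1) :=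
          hhi _ (by omega) (by omega)
        have hget : ∀ k, (dp.set i (dp.getD (i + contOf (nums.getD i 0) + 1) false)).getD k false =
            if k = i then utf8_check_go nums n (i + contOf (nums.getD i 0) + 1) else dp.getD k false := by
          intro k
          by_cases hk : k = i
          · subst hk
            rw [if_pos rfl]
            simp only [List.getD, List.getElem?_set_self (by omega : k < dp.length),
              Option.getD_some]
            simpa [List.getD] using hval
          · simp [List.getD, List.getElem?_set_ne (by omega : i ≠ k), hk]
        refine ih _ (by omega) hlen' ?_ ?_ j hj
        · intro k hk
          rw [hget k, if_neg (Nat.ne_of_lt hk)]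
          exact hlo k (by omega)
        · intro k hk hkn
          rw [hget k]
          by_cases hki : k = i
          · subst hki
            rw [if_pos rfl]
            exact hgo.symm
          · rw [if_neg hki]
            exact hhi k (by omega) hkn
      · have hgo : utf8_check_go nums n i = false := by
          rw [hstep, if_neg h240, if_neg hc]
        have hset : altStep nums n dp i = dp := by
          rw [altStep, if_neg h240, if_neg hc]
        rw [hset]
        refine ih dp (by omega) hlen (fun k hk => hlo k (by omega)) ?_ j hj
        intro k hk hkn
        by_cases hki : k = i
        · subst hki
          rw [hlo _ (by omega), hgo]
        · exact hhi k (by omega) hkn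

-- ===== VERDICT (by name: the statement is the Claim_ definition above) =====
theorem utf8_check_spec : Claim_equal_utf8_check := by
  intro nums _
  unfold Spec_utf8_check utf8_check utf8_check_alt
  set n := nums.length with hn
  have hinit_len : ((List.replicate (n + 1) false).set n true).length = n + 1 := by simp
  have hinit_lo : ∀ j, j < n → ((List.replicate (n + 1) false).set n true).getD j false = false := by
    intro j hj
    rw [List.getD, List.getElem?_set_ne (by omega : n ≠ j)]
    simp [Nat.lt_succ_of_lt hj]
  have hinit_hi : ∀ j, n ≤ j → j ≤ n →
      ((List.replicate (n + 1) false).set n true).getD j false = utf8_check_go nums n j := by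
    intro j hj1 hj2
    have hjn : j = n := by omega
    rw [hjn, List.getD,
      List.getElem?_set_self (by simp : n < (List.replicate (n + 1) false).length),
      utf8_check_go]
    simp
  exact (loop_invariant nums n n ((List.replicate (n + 1) false).set n true) (le_refl _)
    hinit_len hinit_lo hinit_hi 0 (Nat.zero_le _)).symm ▸ rfl
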